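-- pv_equiv track=rewrite | github.com/RetroManb/pixelengine | pixelengine.py | getColorFromTuple
-- ===== SOURCE A (Python) =====
-- def __clamp(x,minimum,maximum):
--     if x < minimum: x = minimum
--     elif x > maximum: x = maximum
--     return x
--
-- def getColorFromTuple(col):
--     r = col[0]
--     g = col[1]
--     b = col[2]
--
--     r = __clamp(r,0,3)
--     g = __clamp(g,0,3)
--     b = __clamp(b,0,3)
--
--     r = bin(r)
--     g = bin(g)
--     b = bin(b)
--
--     r = r.split("0b")[1]
--     g = g.split("0b")[1]
--     b = b.split("0b")[1]
--
--     if len(r) < 2: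
--         for i in range(2-len(r)):
--             r = "0"+r
--     if len(g) < 2:
--         for i in range(2-len(g)):
--             g = "0"+g
--     if len(b) < 2:
--         for i in range(2-len(b)):
--             b = "0"+b
--
--     col = int(r+g+b,2)
--
--     return col
-- ===== SOURCE B (Python) =====
-- def __clamp2(x):
--     return 0 if x < 0 else (3 if x > 3 else x)
--
-- def getColorFromTuple(col):
--     r, g, b = col
--     return (__clamp2(r) << 4) | (__clamp2(g) << 2) | __clamp2(b)
-- ===== Notes on version B (the rewrite author's own statement) =====
-- stated objective: faster
-- what changed: Replaces the bin()/string-split/zero-pad/int(_,2) pipeline with direct arithmetic bit-packing (clamp each channel to [0,3], then (r<<4)|(g<<2)|b).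
import Mathlib
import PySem

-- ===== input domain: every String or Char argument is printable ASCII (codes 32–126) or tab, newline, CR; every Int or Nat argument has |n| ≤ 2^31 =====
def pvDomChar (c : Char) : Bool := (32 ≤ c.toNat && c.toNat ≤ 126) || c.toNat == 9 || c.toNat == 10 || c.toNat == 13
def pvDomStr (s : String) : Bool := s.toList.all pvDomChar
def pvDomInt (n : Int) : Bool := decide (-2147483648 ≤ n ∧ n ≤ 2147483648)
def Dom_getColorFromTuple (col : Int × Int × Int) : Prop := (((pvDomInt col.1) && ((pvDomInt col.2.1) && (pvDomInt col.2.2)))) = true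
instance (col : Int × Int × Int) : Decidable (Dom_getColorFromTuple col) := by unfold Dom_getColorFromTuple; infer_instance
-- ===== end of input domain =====

-- B replaces A's bin()/split/pad/int(_,2) string pipeline with direct arithmetic bit-packing (constant-factor speedup).

-- ===== PORT A =====
-- __clamp(x, minimum, maximum)
def pvClamp (x mn mx : Int) : Int :=
  if x < mn then mn else if x > mx then mx else x

-- bin(n).split("0b")[1] for n ≥ 0: the binary digit string (as a char list); exact for n ≥ 0
-- (here n is always the result of __clamp(_,0,3), hence 0 ≤ n).
def pvBinDigits (n : Int) : List Char := Nat.toDigits 2 n.toNat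

-- the zero-padding loop: for i in range(2 - len(s)): s = "0" + s
def pvPad (s : List Char) : List Char :=
  if s.length < 2 then
    (PySem.List.pyRange 0 (2 - (s.length : Int)) 1).foldl (fun acc _ => '0' :: acc) s
  else s

-- int(s, 2) for a string of '0'/'1' digits (exact on such strings, which is all A builds)
def pvParseBin (s : List Char) : Int :=
  s.foldl (fun a c => 2 * a + (if c = '1' then 1 else 0)) 0

def getColorFromTuple (col : Int × Int × Int) : Int :=
  let r := col.1
  let g := col.2.1
  let b := col.2.2
  let r := pvClamp r 0 3
  let g := pvClamp g 0 3
  let b := pvClamp b 0 3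
  let rs := pvBinDigits r
  let gs := pvBinDigits g
  let bs := pvBinDigits b
  let rs := pvPad rs
  let gs := pvPad gs
  let bs := pvPad bs
  pvParseBin (rs ++ gs ++ bs)

-- ===== PORT B =====
-- __clamp2(x) = 0 if x < 0 else (3 if x > 3 else x)
def pvClamp2 (x : Int) : Int := if x < 0 then 0 else if x > 3 then 3 else x

def getColorFromTuple_alt (col : Int × Int × Int) : Int :=
  Int.lor (Int.lor (pvClamp2 col.1 <<< 4) (pvClamp2 col.2.1 <<< 2)) (pvClamp2 col.2.2)

-- ===== PRECONDITION & SPEC =====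
def Spec_getColorFromTuple (col : Int × Int × Int) (out : Int) : Prop := out = getColorFromTuple_alt col
instance (col : Int × Int × Int) (out : Int) : Decidable (Spec_getColorFromTuple col out) := by unfold Spec_getColorFromTuple; infer_instance

-- ===== CLAIM (what is proved, stated in full; the proofs are below) =====
def Claim_equal_getColorFromTuple : Prop := ∀ (col : Int × Int × Int), Dom_getColorFromTuple col → Spec_getColorFromTuple col (getColorFromTuple col)

-- ===== LEMMAS AND PROOFS =====

lemma pvClamp2_eq (x : Int) : pvClamp2 x = pvClamp x 0 3 := by
  unfold pvClamp2 pvClamp; split_ifs <;> omega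

lemma pvClamp_bounds (x : Int) : 0 ≤ pvClamp x 0 3 ∧ pvClamp x 0 3 ≤ 3 := by
  unfold pvClamp; split_ifs <;> omega

-- the whole pipeline agrees with bit-packing on clamped channels
lemma pipeline_eq (r g b : Int) (hr0 : 0 ≤ r) (hr1 : r ≤ 3) (hg0 : 0 ≤ g) (hg1 : g ≤ 3)
    (hb0 : 0 ≤ b) (hb1 : b ≤ 3) :
    pvParseBin (pvPad (pvBinDigits r) ++ pvPad (pvBinDigits g) ++ pvPad (pvBinDigits b)) =
      Int.lor (Int.lor (r <<< 4) (g <<< 2)) b := by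
  interval_cases r <;> interval_cases g <;> interval_cases b <;> decide

-- ===== VERDICT (by name: the statement is the Claim_ definition above) =====
theorem getColorFromTuple_spec : Claim_equal_getColorFromTuple := by
  intro ⟨r, g, b⟩ _
  unfold Spec_getColorFromTuple getColorFromTuple getColorFromTuple_alt
  simp only [pvClamp2_eq]
  exact pipeline_eq _ _ _ (pvClamp_bounds r).1 (pvClamp_bounds r).2 (pvClamp_bounds g).1
    (pvClamp_bounds g).2 (pvClamp_bounds b).1 (pvClamp_bounds b).2
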